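-- pv_equiv track=rewrite | github.com/chapmanjacobd/library | library/utils/iterables.py | list_dict_filter_unique
-- ===== SOURCE A (Python) =====
-- def list_dict_filter_unique(data: list[dict]) -> list[dict]:
--     if len(data) == 0:
--         return []
--
--     unique_values = {}
--     for key in set.intersection(*(set(d.keys()) for d in data)):
--         values = {d[key] for d in data if key in d}
--         if len(values) > 1:
--             unique_values[key] = values
--     filtered_data = [{k: v for k, v in d.items() if k in unique_values} for d in data]
--     return filtered_data
-- ===== SOURCE B (Python) =====
-- def list_dict_filter_unique(data: list[dict]) -> list[dict]:
--     counts = {}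
--     values = {}
--     for d in data:
--         for k, v in d.items():
--             counts[k] = counts.get(k, 0) + 1
--             values.setdefault(k, set()).add(v)
--     n = len(data)
--     keep = {k for k in counts if counts[k] == n and len(values[k]) > 1}
--     return [{k: v for k, v in d.items() if k in keep} for d in data]
-- ===== Notes on version B (the rewrite author's own statement) =====
-- stated objective: alternative
-- what changed: Instead of intersecting all key sets and then rescanning every dict for each common key, B makes one pass over all items building a per-key count and a per-key value-set table, then keeps keys whose count equals len(data) and whose value set has more than one element.
import Mathlib
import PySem

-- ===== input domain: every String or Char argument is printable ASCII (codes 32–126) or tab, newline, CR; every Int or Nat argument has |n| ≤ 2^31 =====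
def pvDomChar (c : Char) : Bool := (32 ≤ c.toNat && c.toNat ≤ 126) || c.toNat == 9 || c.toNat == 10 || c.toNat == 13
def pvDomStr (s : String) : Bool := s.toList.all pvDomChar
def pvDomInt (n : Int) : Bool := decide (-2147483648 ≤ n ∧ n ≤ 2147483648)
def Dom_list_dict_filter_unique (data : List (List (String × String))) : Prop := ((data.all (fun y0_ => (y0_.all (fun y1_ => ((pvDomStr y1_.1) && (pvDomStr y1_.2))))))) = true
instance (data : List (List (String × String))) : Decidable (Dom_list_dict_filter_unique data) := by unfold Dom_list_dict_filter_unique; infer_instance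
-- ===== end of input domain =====

-- B replaces A's key-set intersection plus per-key rescan of all dicts by a single pass
-- building count and value-set tables, then one filtering pass (objective: alternative single-pass algorithm; speed not measured).


-- ===== PORT A =====
-- helper: set(d.keys())
def pvAkeys (d : List (String × String)) : PySem.Set String := PySem.Set.ofList (d.map Prod.fst)
-- helper: {d[key] for d in data if key in d}
def pvAvalues (data : List (List (String × String))) (key : String) : PySem.Set String :=
  data.foldl (fun s d =>
    if (PySem.Dict.mk d).contains key then PySem.Set.add s ((PySem.Dict.mk d).getD key "") else s) []

def list_dict_filter_unique (data : List (List (String × String))) : List (List (String × String)) :=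
  if data.length = 0 then []
  else
    -- set.intersection(*(set(d.keys()) for d in data))
    let inter := (data.map pvAkeys).tail.foldl PySem.Set.inter ((data.map pvAkeys).headD [])
    -- unique_values (only its key-membership is used below, so set iteration order is immaterial)
    let uv : PySem.Dict String (PySem.Set String) :=
      inter.foldl (fun uv key =>
        let values := pvAvalues data key
        if 1 < values.length then uv.insert key values else uv) PySem.Dict.empty
    data.map (fun d => d.filter (fun kv => uv.contains kv.1))

-- ===== PORT B =====
def list_dict_filter_unique_alt (data : List (List (String × String))) : List (List (String × String)) :=
  let st := data.foldl (fun (st : PySem.Dict String Int × PySem.Dict String (PySem.Set String)) d =>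
      d.foldl (fun st kv =>
        (st.1.insert kv.1 (st.1.getD kv.1 0 + 1),
         st.2.modify kv.1 [] (fun s => PySem.Set.add s kv.2))) st)
    ((PySem.Dict.empty : PySem.Dict String Int), (PySem.Dict.empty : PySem.Dict String (PySem.Set String)))
  let n : Int := data.length
  let keep : PySem.Set String :=
    st.1.keys.filter (fun k => st.1.getD k 0 == n && decide (1 < (st.2.getD k []).length))
  data.map (fun d => d.filter (fun kv => PySem.Set.contains keep kv.1))

-- ===== PRECONDITION & SPEC =====
-- Pre_ excludes inner association lists with a duplicated key: those do not represent a
-- Python dict (A's declared argument type list[dict]), so A's behaviour on them is undefined.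
def Pre_list_dict_filter_unique (data : List (List (String × String))) : Prop :=
  ∀ d ∈ data, (d.map Prod.fst).Nodup
instance (data : List (List (String × String))) : Decidable (Pre_list_dict_filter_unique data) := by
  unfold Pre_list_dict_filter_unique; infer_instance

def pvWitness_list_dict_filter_unique : (List (List (String × String))) :=
  [[("a", "x"), ("b", "y")], [("a", "z"), ("b", "y")]]

def Spec_list_dict_filter_unique (data : List (List (String × String))) (out : List (List (String × String))) : Prop := out = list_dict_filter_unique_alt data
instance (data : List (List (String × String))) (out : List (List (String × String))) : Decidable (Spec_list_dict_filter_unique data out) := by unfold Spec_list_dict_filter_unique; infer_instance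

-- ===== CLAIM (what is proved, stated in full; the proofs are below) =====
def Claim_equal_list_dict_filter_unique : Prop := ∀ (data : List (List (String × String))), Dom_list_dict_filter_unique data → Pre_list_dict_filter_unique data → Spec_list_dict_filter_unique data (list_dict_filter_unique data)

-- ===== LEMMAS AND PROOFS =====

theorem pv_mem_inter_foldl (ts : List (PySem.Set String)) (s : PySem.Set String) (k : String) :
    k ∈ ts.foldl PySem.Set.inter s ↔ k ∈ s ∧ ∀ t ∈ ts, k ∈ t := by
  induction ts generalizing s with
  | nil => simp
  | cons t ts ih => simp [List.foldl_cons, ih, PySem.Set.mem_inter]; tauto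

theorem pv_uv_contains (l : List String) (V : String → PySem.Set String)
    (uv : PySem.Dict String (PySem.Set String)) (k : String) :
    (l.foldl (fun uv key => if 1 < (V key).length then uv.insert key (V key) else uv) uv).contains k = true
    ↔ uv.contains k = true ∨ (k ∈ l ∧ 1 < (V k).length) := by
  induction l generalizing uv with
  | nil => simp
  | cons a l ih =>
    by_cases h : 1 < (V a).length
    · by_cases hk : k = a
      · subst hk
        simp [List.foldl_cons, h, ih]
        try tauto
      · simp [List.foldl_cons, h, ih, PySem.Dict.contains_insert, hk]
        try tauto
    · by_cases hk : k = a
      · subst hk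
        simp [List.foldl_cons, h, ih]
        try tauto
      · simp [List.foldl_cons, h, ih, hk]

theorem pv_filter_vals (d : List (String × String)) (k : String) (hd : (d.map Prod.fst).Nodup) :
    (d.filter (fun p => p.1 == k)).map Prod.snd
    = if (PySem.Dict.mk d).contains k then [(PySem.Dict.mk d).getD k ""] else [] := by
  induction d with
  | nil => simp
  | cons p d ih =>
    obtain ⟨a, b⟩ := p
    simp only [List.map_cons, List.nodup_cons] at hd
    obtain ⟨ha, hnd⟩ := hd
    rw [PySem.Dict.contains_eq_isSome_get?, PySem.Dict.getD_eq_get?_getD, PySem.Dict.get?_mk_cons]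
    by_cases hk : a = k
    · subst hk
      have hfil : d.filter (fun p => p.1 == a) = [] := by
        rw [List.filter_eq_nil_iff]
        intro p hp hpa
        exact ha (List.mem_map.mpr ⟨p, hp, by simpa using hpa⟩)
      simp [hfil]
    · simp only [beq_iff_eq, hk, if_false, List.filter_cons]
      rw [← PySem.Dict.contains_eq_isSome_get?, ← PySem.Dict.getD_eq_get?_getD]
      simpa [hk] using ih hnd

def pvValsOf (data : List (List (String × String))) (k : String) : List String :=
  ((data.flatMap id).filter (fun p => p.1 == k)).map Prod.snd

theorem pv_valuesA_aux (data : List (List (String × String))) (k : String)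
    (h : ∀ d ∈ data, (d.map Prod.fst).Nodup) (s0 : PySem.Set String) :
    data.foldl (fun s d =>
      if (PySem.Dict.mk d).contains k then PySem.Set.add s ((PySem.Dict.mk d).getD k "") else s) s0
    = PySem.Set.update s0 (pvValsOf data k) := by
  induction data generalizing s0 with
  | nil => simp [pvValsOf, PySem.Set.update_nil]
  | cons d rest ih =>
    have hstep : (if (PySem.Dict.mk d).contains k then PySem.Set.add s0 ((PySem.Dict.mk d).getD k "") else s0)
        = PySem.Set.update s0 ((d.filter (fun p => p.1 == k)).map Prod.snd) := by
      rw [pv_filter_vals d k (h d (by simp))]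
      by_cases hc : (PySem.Dict.mk d).contains k
      · simp [hc, PySem.Set.update_cons, PySem.Set.update_nil]
      · simp [hc, PySem.Set.update_nil]
    simp only [List.foldl_cons, hstep, pvValsOf, List.flatMap_cons, id, List.filter_append, List.map_append]
    rw [PySem.Set.update_append]
    exact ih (fun d hd => h d (by simp [hd])) _

theorem pv_valuesA_eq (data : List (List (String × String))) (k : String)
    (h : ∀ d ∈ data, (d.map Prod.fst).Nodup) :
    pvAvalues data k = PySem.Set.ofList (pvValsOf data k) := by
  rw [pvAvalues, pv_valuesA_aux data k h, PySem.Set.update_nil_left]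

def pvKeysOf (d : List (String × String)) : List String := d.map Prod.fst

theorem pv_count_flat (data : List (List (String × String))) (k : String)
    (h : ∀ d ∈ data, (d.map Prod.fst).Nodup) :
    ((data.flatMap id).map Prod.fst).count k ≤ data.length ∧
    (((data.flatMap id).map Prod.fst).count k = data.length ↔ ∀ d ∈ data, k ∈ pvKeysOf d) := by
  induction data with
  | nil => simp
  | cons d rest ih =>
    obtain ⟨ih1, ih2⟩ := ih (fun d hd => h d (by simp [hd]))
    have h1 : (d.map Prod.fst).count k ≤ 1 := List.nodup_iff_count_le_one.mp (h d (by simp)) k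
    have h2 : 0 < (d.map Prod.fst).count k ↔ k ∈ pvKeysOf d := by simp [pvKeysOf, List.count_pos_iff]
    constructor
    · simp only [List.flatMap_cons, id, List.map_append, List.count_append, List.length_cons]; omega
    · simp only [List.flatMap_cons, id, List.map_append, List.count_append, List.length_cons, List.mem_cons]
      constructor
      · intro heq
        have hd1 : (d.map Prod.fst).count k = 1 := by omega
        have hr : ((rest.flatMap id).map Prod.fst).count k = rest.length := by omega
        intro d' hd'
        rcases hd' with rfl | hd'
        · exact h2.mp (by omega)
        · exact ih2.mp hr d' hd'
      · intro hall
        have hd1 : 0 < (d.map Prod.fst).count k := h2.mpr (hall d (Or.inl rfl))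
        have hr : ((rest.flatMap id).map Prod.fst).count k = rest.length := ih2.mpr (fun d' hd' => hall d' (Or.inr hd'))
        omega

-- nested fold over dicts = fold over the flattened pair list
theorem pv_foldl_flat {α : Type} (data : List (List (String × String)))
    (f : α → (String × String) → α) (a0 : α) :
    data.foldl (fun a d => d.foldl f a) a0 = (data.flatMap id).foldl f a0 := by
  induction data generalizing a0 with
  | nil => rfl
  | cons d rest ih => simp only [List.foldl_cons, List.flatMap_cons, List.foldl_append, id, ih]

theorem pv_counts_getD (l : List (String × String)) (k : String) :
    (l.foldl (fun c p => c.insert p.1 (c.getD p.1 0 + 1)) (PySem.Dict.empty : PySem.Dict String Int)).getD k 0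
    = ((l.map Prod.fst).count k : Int) := by
  have h := List.foldl_map (f := fun (p : String × String) => p.1)
    (g := fun (c : PySem.Dict String Int) x => c.insert x (c.getD x 0 + 1))
    (l := l) (init := (PySem.Dict.empty : PySem.Dict String Int))
  rw [← h, PySem.Dict.getD_foldl_insert_add_one]
  simp

theorem pv_counts_keys (l : List (String × String)) :
    (l.foldl (fun c p => c.insert p.1 (c.getD p.1 0 + 1)) (PySem.Dict.empty : PySem.Dict String Int)).keys
    = PySem.Set.ofList (l.map Prod.fst) := by
  rw [PySem.Dict.keys_foldl_insert_key (key := fun (p : String × String) => p.1)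
    (f := fun (c : PySem.Dict String Int) p => c.getD p.1 0 + 1)]
  simp [PySem.Set.update_nil_left]

theorem pv_vals_getD (l : List (String × String)) (dv : PySem.Dict String (PySem.Set String)) (k : String) :
    (l.foldl (fun v p => v.modify p.1 [] (fun s => PySem.Set.add s p.2)) dv).getD k []
    = PySem.Set.update (dv.getD k []) ((l.filter (fun p => p.1 == k)).map Prod.snd) := by
  induction l generalizing dv with
  | nil => simp [PySem.Set.update_nil]
  | cons p l ih =>
    simp only [List.foldl_cons, ih, PySem.Dict.getD_modify, List.filter_cons]
    by_cases hk : k = p.1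
    · simp [hk, PySem.Set.update_cons]
    · have : (p.1 == k) = false := by simpa using fun h => hk h.symm
      simp [hk, this]

theorem pv_main (data : List (List (String × String)))
    (hpre : ∀ d ∈ data, (d.map Prod.fst).Nodup) :
    list_dict_filter_unique data = list_dict_filter_unique_alt data := by
  cases data with
  | nil => rfl
  | cons d0 rest =>
    rw [list_dict_filter_unique, list_dict_filter_unique_alt, if_neg (by simp)]
    simp only [pv_foldl_flat]
    rw [PySem.List.foldl_prod_mk
      (fun (c : PySem.Dict String Int) (kv : String × String) => c.insert kv.1 (c.getD kv.1 0 + 1))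
      (fun (v : PySem.Dict String (PySem.Set String)) (kv : String × String) => v.modify kv.1 [] (fun s => PySem.Set.add s kv.2))
      (List.flatMap id (d0 :: rest)) PySem.Dict.empty PySem.Dict.empty]
    apply List.map_congr_left
    intro d hd
    apply List.filter_congr
    intro kv hkv
    rw [Bool.eq_iff_iff]
    rw [pv_uv_contains, PySem.Set.contains_iff]
    rw [List.mem_filter]
    simp only [List.map_cons, List.headD_cons, List.tail_cons]
    rw [pv_mem_inter_foldl]
    rw [pv_counts_keys, pv_counts_getD, pv_vals_getD]
    have hveq := pv_valuesA_eq (d0 :: rest) kv.1 hpre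
    have hcf := pv_count_flat (d0 :: rest) kv.1 hpre
    simp only [pvKeysOf] at hcf
    simp only [PySem.Dict.contains_empty, PySem.Dict.getD_empty, PySem.Set.update_nil_left,
      PySem.Set.mem_ofList, pvAkeys, Bool.and_eq_true, beq_iff_eq, decide_eq_true_eq,
      Nat.cast_inj, Bool.false_eq_true, false_or, hveq, pvValsOf]
    constructor
    · rintro ⟨⟨h0, hr⟩, hx⟩
      have hall : ∀ d' ∈ d0 :: rest, kv.1 ∈ d'.map Prod.fst := by
        intro d' hd'
        rcases List.mem_cons.mp hd' with rfl | hd'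
        · exact h0
        · have := hr (PySem.Set.ofList (d'.map Prod.fst)) (List.mem_map.mpr ⟨d', hd', rfl⟩)
          simpa [PySem.Set.mem_ofList] using this
      have hcnt := hcf.2.mpr hall
      refine ⟨?_, hcnt, hx⟩
      have : 0 < ((List.flatMap id (d0 :: rest)).map Prod.fst).count kv.1 := by
        rw [hcnt]; simp
      exact List.count_pos_iff.mp this
    · rintro ⟨hmem, hcnt, hx⟩
      have hall := hcf.2.mp hcnt
      refine ⟨⟨hall d0 (by simp), ?_⟩, hx⟩
      intro t ht
      rcases List.mem_map.mp ht with ⟨d', hd', rfl⟩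
      have h := hall d' (by simp [hd'])
      simp only [pvAkeys, PySem.Set.mem_ofList]
      simpa using h

-- ===== VERDICT (by name: the statement is the Claim_ definition above) =====
theorem list_dict_filter_unique_spec : Claim_equal_list_dict_filter_unique := by
  intro data _ hpre
  unfold Spec_list_dict_filter_unique
  exact pv_main data hpre
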